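-- pv_equiv track=rewrite | github.com/Kotoad/OmniBoard_Studio | FileManager.py | _compare_variable_group
-- ===== SOURCE A (Python) =====
-- def _compare_variable_group(saved_vars, current_vars, location):
--     """Compare a group of variables (main or function)"""
--
--     # Find added
--     for vid, c_var in current_vars.items():
--         if vid not in saved_vars:
--             return True
--         else:
--             # Check for modifications
--             s_var = saved_vars[vid]
--             if c_var != s_var:
--                 return True
--
--     # Find removed
--     for vid in saved_vars:
--         if vid not in current_vars:
--             return True
--
--     return False
-- ===== SOURCE B (Python) =====
-- def _compare_variable_group(saved_vars, current_vars, location):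
--     """Compare a group of variables (main or function)"""
--     # Canonical-form comparison: sort each dict's items by key and compare the
--     # two canonical lists; any added/removed/modified variable makes them differ.
--     def canon(d):
--         return sorted(d.items(), key=lambda kv: kv[0])
--     return canon(saved_vars) != canon(current_vars)
-- ===== Notes on version B (the rewrite author's own statement) =====
-- stated objective: simpler
-- what changed: Replaces A's two membership/lookup loops (added-or-modified pass plus removed pass) by a canonical-form comparison: sort each dict's items by key and compare the two sorted lists for equality.
import Mathlib
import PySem

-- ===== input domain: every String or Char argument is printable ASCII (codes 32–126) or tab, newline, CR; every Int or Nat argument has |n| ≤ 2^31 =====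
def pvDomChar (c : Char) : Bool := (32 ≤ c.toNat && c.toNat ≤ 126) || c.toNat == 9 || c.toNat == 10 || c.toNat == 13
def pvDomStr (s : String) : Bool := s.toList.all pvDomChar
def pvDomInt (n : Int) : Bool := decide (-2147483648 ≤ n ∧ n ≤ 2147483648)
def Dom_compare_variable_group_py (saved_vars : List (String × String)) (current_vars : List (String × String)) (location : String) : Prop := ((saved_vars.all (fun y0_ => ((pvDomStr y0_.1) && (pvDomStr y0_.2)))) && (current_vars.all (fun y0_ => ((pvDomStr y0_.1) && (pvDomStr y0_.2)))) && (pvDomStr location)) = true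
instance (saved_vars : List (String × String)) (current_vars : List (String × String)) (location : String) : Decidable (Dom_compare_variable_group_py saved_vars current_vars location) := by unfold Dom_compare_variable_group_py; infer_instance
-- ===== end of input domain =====

-- B replaces A's two membership/lookup loops by a canonical-form comparison:
-- sort each dict's items by key, compare the two sorted lists (objective: simpler).

-- ===== PORT A =====
-- first loop of A: for vid, c_var in current_vars.items(): added or modified?
def aFirstLoop (saved : PySem.Dict String String) : List (String × String) → Bool
  | [] => false
  | (vid, c_var) :: rest =>
    if !saved.contains vid then true
    else
      match saved.get? vid with
      | none => true            -- unreachable: guarded by 'contains' above (Python: saved_vars[vid])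
      | some s_var => if c_var ≠ s_var then true else aFirstLoop saved rest

-- second loop of A: for vid in saved_vars: removed?
def aSecondLoop (cur : PySem.Dict String String) : List String → Bool
  | [] => false
  | vid :: rest => if !cur.contains vid then true else aSecondLoop cur rest

def compare_variable_group_py (saved_vars : List (String × String)) (current_vars : List (String × String)) (location : String) : Bool :=
  if aFirstLoop (PySem.Dict.mk saved_vars) (PySem.Dict.mk current_vars).items then true
  else aSecondLoop (PySem.Dict.mk current_vars) (PySem.Dict.mk saved_vars).keys

-- ===== PORT B =====
-- canon(d) = sorted(d.items(), key=lambda kv: kv[0])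
def bCanon (d : PySem.Dict String String) : List (String × String) :=
  PySem.List.sorted d.items (·.1)

def compare_variable_group_py_alt (saved_vars : List (String × String)) (current_vars : List (String × String)) (location : String) : Bool :=
  decide (bCanon (PySem.Dict.mk saved_vars) ≠ bCanon (PySem.Dict.mk current_vars))

-- ===== PRECONDITION & SPEC =====
-- Pre_ excludes association lists with duplicate keys: they do not represent a Python
-- dict (building the dict collapses the duplicates), so the assoc-list ports' values
-- there are not values of any dict input.
def Pre_compare_variable_group_py (saved_vars : List (String × String)) (current_vars : List (String × String)) (location : String) : Prop :=
  (saved_vars.map (·.1)).Nodup ∧ (current_vars.map (·.1)).Nodup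
instance (saved_vars : List (String × String)) (current_vars : List (String × String)) (location : String) : Decidable (Pre_compare_variable_group_py saved_vars current_vars location) := by unfold Pre_compare_variable_group_py; infer_instance

def pvWitness_compare_variable_group_py : (List (String × String)) × (List (String × String)) × String := ([("a", "1")], [("a", "1")], "main")

def Spec_compare_variable_group_py (saved_vars : List (String × String)) (current_vars : List (String × String)) (location : String) (out : Bool) : Prop := out = compare_variable_group_py_alt saved_vars current_vars location
instance (saved_vars : List (String × String)) (current_vars : List (String × String)) (location : String) (out : Bool) : Decidable (Spec_compare_variable_group_py saved_vars current_vars location out) := by unfold Spec_compare_variable_group_py; infer_instance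

-- ===== CLAIM (what is proved, stated in full; the proofs are below) =====
def Claim_equal_compare_variable_group_py : Prop := ∀ (saved_vars : List (String × String)) (current_vars : List (String × String)) (location : String), Dom_compare_variable_group_py saved_vars current_vars location → Pre_compare_variable_group_py saved_vars current_vars location → Spec_compare_variable_group_py saved_vars current_vars location (compare_variable_group_py saved_vars current_vars location)

-- ===== LEMMAS AND PROOFS =====

-- A's first loop is false iff every current item is found unchanged in saved
theorem aFirstLoop_false_iff (sd : PySem.Dict String String) (l : List (String × String)) :
    aFirstLoop sd l = false ↔ ∀ p ∈ l, sd.get? p.1 = some p.2 := by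
  induction l with
  | nil => simp [aFirstLoop]
  | cons p rest ih =>
    obtain ⟨vid, c⟩ := p
    simp only [aFirstLoop]
    rw [PySem.Dict.contains_eq_isSome_get?]
    cases h : sd.get? vid with
    | none => simp [h]
    | some s =>
      by_cases hcs : c = s
      · subst hcs; simp [h, ih]
      · simp [h, hcs]
        exact fun hsc => absurd hsc.symm hcs

-- A's second loop is false iff every saved key is still a current key
theorem aSecondLoop_false_iff (cd : PySem.Dict String String) (ks : List String) :
    aSecondLoop cd ks = false ↔ ∀ k ∈ ks, cd.contains k = true := by
  induction ks with
  | nil => simp [aSecondLoop]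
  | cons k rest ih =>
    simp only [aSecondLoop]
    by_cases h : cd.contains k = true
    · simp [h, ih]
    · simp [Bool.not_eq_true] at h; simp [h]

-- A is false iff the two item lists are permutations of each other
theorem a_false_iff_perm (saved cur : List (String × String)) (loc : String)
    (hS : (saved.map (·.1)).Nodup) (hC : (cur.map (·.1)).Nodup) :
    compare_variable_group_py saved cur loc = false ↔ saved.Perm cur := by
  have hSk : (PySem.Dict.mk saved).keys.Nodup := by rw [PySem.Dict.keys_mk]; exact hS
  have hCk : (PySem.Dict.mk cur).keys.Nodup := by rw [PySem.Dict.keys_mk]; exact hC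
  have hSn : saved.Nodup := hS.of_map _
  have hCn : cur.Nodup := hC.of_map _
  unfold compare_variable_group_py
  constructor
  · intro h
    by_cases h1 : aFirstLoop (PySem.Dict.mk saved) (PySem.Dict.mk cur).items = true
    · simp [h1] at h
    · rw [Bool.not_eq_true] at h1
      rw [h1] at h
      simp only [Bool.false_eq_true, if_false] at h
      rw [aFirstLoop_false_iff] at h1
      rw [aSecondLoop_false_iff] at h
      rw [List.perm_ext_iff_of_nodup hSn hCn]
      intro ⟨k, v⟩
      constructor
      · intro hmem
        have hk : k ∈ (PySem.Dict.mk saved).keys :=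
          PySem.Dict.mem_keys_of_mem_items _ (p := (k, v)) hmem
        have hc := h k hk
        rw [PySem.Dict.contains_eq_isSome_get?] at hc
        obtain ⟨w, hw⟩ := Option.isSome_iff_exists.mp hc
        have hwC : (k, w) ∈ cur := (PySem.Dict.get?_eq_some_iff_mem_items _ _ _ hCk).mp hw
        have := h1 (k, w) hwC
        have hv : (PySem.Dict.mk saved).get? k = some v :=
          PySem.Dict.get?_of_mem_items _ hmem hSk
        rw [hv] at this
        cases this
        exact hwC
      · intro hmem
        exact (PySem.Dict.get?_eq_some_iff_mem_items _ _ _ hSk).mp (h1 (k, v) hmem)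
  · intro hperm
    have h1 : aFirstLoop (PySem.Dict.mk saved) (PySem.Dict.mk cur).items = false := by
      rw [aFirstLoop_false_iff]
      intro p hp
      exact PySem.Dict.get?_of_mem_items _ (hperm.mem_iff.mpr hp) hSk
    rw [h1]
    simp only [Bool.false_eq_true, if_false]
    rw [aSecondLoop_false_iff]
    intro k hk
    rw [PySem.Dict.keys_mk] at hk
    obtain ⟨p, hp, rfl⟩ := List.mem_map.mp hk
    rw [PySem.Dict.contains_iff_mem_keys, PySem.Dict.keys_mk]
    exact List.mem_map_of_mem (hperm.mem_iff.mp hp)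

-- B is false iff the two item lists are permutations of each other
theorem b_false_iff_perm (saved cur : List (String × String)) (loc : String)
    (hC : (cur.map (·.1)).Nodup) :
    compare_variable_group_py_alt saved cur loc = false ↔ saved.Perm cur := by
  unfold compare_variable_group_py_alt bCanon
  simp only [decide_not, Bool.not_eq_false', decide_eq_true_eq]
  constructor
  · intro h
    have hsv : saved.Perm (PySem.List.sorted cur (·.1)) :=
      h ▸ (PySem.List.sorted_perm saved (·.1) false).symm
    exact hsv.trans (PySem.List.sorted_perm cur (·.1) false)
  · intro hperm
    apply PySem.List.sorted_eq_of_perm_of_pairwise_lt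
    · exact (PySem.List.sorted_perm cur (·.1) false).trans hperm.symm
    · have hle := PySem.List.sorted_pairwise cur (·.1)
      have hnd : ((PySem.List.sorted cur (·.1) false).map (·.1)).Nodup :=
        (((PySem.List.sorted_perm cur (·.1) false).map (·.1)).nodup_iff).mpr hC
      have hne : (PySem.List.sorted cur (·.1) false).Pairwise (fun a b => a.1 ≠ b.1) :=
        (List.pairwise_map.mp hnd)
      exact (hle.and hne).imp (fun h => lt_of_le_of_ne h.1 h.2)

-- ===== VERDICT (by name: the statement is the Claim_ definition above) =====
theorem compare_variable_group_py_spec : Claim_equal_compare_variable_group_py := by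
  intro saved cur loc _ ⟨hS, hC⟩
  unfold Spec_compare_variable_group_py
  have ha := a_false_iff_perm saved cur loc hS hC
  have hb := b_false_iff_perm saved cur loc hC
  cases h : compare_variable_group_py_alt saved cur loc with
  | false => exact ha.mpr (hb.mp h)
  | true =>
    cases h2 : compare_variable_group_py saved cur loc with
    | true => rfl
    | false =>
      rw [hb.mpr (ha.mp h2)] at h
      cases h
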